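-- pv_equiv track=rewrite | github.com/nickmeinhold/flux-shadow | src/reach.py | _extract_dream_excerpt
-- ===== SOURCE A (Python) =====
-- def _extract_dream_excerpt(dream_text: str) -> str:
--     """Pull the last meaningful line from a dream as an excerpt."""
--     lines = [
--         line.strip() for line in dream_text.strip().split("\n")
--         if line.strip()
--         and not line.startswith("## Dream")
--         and not line.startswith("---")
--     ]
--     if lines:
--         return lines[-1][:200]
--     return "I dreamed, but the words dissolved."
-- ===== SOURCE B (Python) =====
-- def _extract_dream_excerpt(dream_text: str) -> str:
--     """Pull the last meaningful line from a dream as an excerpt."""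
--     for line in reversed(dream_text.strip().split("\n")):
--         if (line.strip()
--                 and not line.startswith("## Dream")
--                 and not line.startswith("---")):
--             return line.strip()[:200]
--     return "I dreamed, but the words dissolved."
-- ===== Notes on version B (the rewrite author's own statement) =====
-- stated objective: simpler
-- what changed: A materialises the full filtered+stripped list of lines and then takes its last element; B instead scans the split lines backwards and returns at the first meaningful line, building no intermediate list.
import Mathlib
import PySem

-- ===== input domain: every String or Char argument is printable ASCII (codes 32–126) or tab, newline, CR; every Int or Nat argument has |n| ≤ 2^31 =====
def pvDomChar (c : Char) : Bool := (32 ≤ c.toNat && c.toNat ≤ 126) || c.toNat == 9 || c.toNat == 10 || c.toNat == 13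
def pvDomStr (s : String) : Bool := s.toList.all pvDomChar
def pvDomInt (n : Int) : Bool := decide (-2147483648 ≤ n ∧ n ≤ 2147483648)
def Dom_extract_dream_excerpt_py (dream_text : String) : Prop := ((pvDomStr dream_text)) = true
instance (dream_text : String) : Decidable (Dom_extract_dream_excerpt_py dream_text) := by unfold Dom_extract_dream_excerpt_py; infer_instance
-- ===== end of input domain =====

-- B replaces A's "build the full filtered+stripped list then take its last element" with a
-- short-circuiting backward scan over the split lines (objective: simpler).


-- ===== PORT A =====
-- A's comprehension filter: line.strip() truthy, not startswith "## Dream", not startswith "---"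
def pvKeepA (line : String) : Bool :=
  (PySem.Str.strip line != "") && !(PySem.Str.startswith line "## Dream") && !(PySem.Str.startswith line "---")

-- split("\n"): the separator is the nonempty literal "\n", so PySem.Str.split? is always `some`; exact
def extract_dream_excerpt_py (dream_text : String) : String :=
  let lines : List String :=
    (((PySem.Str.split? (PySem.Str.strip dream_text) "\n").getD []).filter pvKeepA).map PySem.Str.strip
  match lines.getLast? with
  | some l => PySem.Str.slice l none (some 200)     -- lines[-1][:200]
  | none => "I dreamed, but the words dissolved."

-- ===== PORT B =====
-- B's reverse loop: first meaningful line wins, else the fallback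
def pvScanB : List String → String
  | [] => "I dreamed, but the words dissolved."
  | line :: rest =>
    if (PySem.Str.strip line != "") && !(PySem.Str.startswith line "## Dream")
        && !(PySem.Str.startswith line "---") then
      PySem.Str.slice (PySem.Str.strip line) none (some 200)
    else
      pvScanB rest

def extract_dream_excerpt_py_alt (dream_text : String) : String :=
  pvScanB ((PySem.Str.split? (PySem.Str.strip dream_text) "\n").getD []).reverse

-- ===== PRECONDITION & SPEC =====
def Spec_extract_dream_excerpt_py (dream_text : String) (out : String) : Prop := out = extract_dream_excerpt_py_alt dream_text
instance (dream_text : String) (out : String) : Decidable (Spec_extract_dream_excerpt_py dream_text out) := by unfold Spec_extract_dream_excerpt_py; infer_instance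

-- ===== CLAIM (what is proved, stated in full; the proofs are below) =====
def Claim_equal_extract_dream_excerpt_py : Prop := ∀ (dream_text : String), Dom_extract_dream_excerpt_py dream_text → Spec_extract_dream_excerpt_py dream_text (extract_dream_excerpt_py dream_text)

-- ===== LEMMAS AND PROOFS =====

theorem pvScanB_cons (line : String) (rest : List String) :
    pvScanB (line :: rest) =
      if pvKeepA line then PySem.Str.slice (PySem.Str.strip line) none (some 200)
      else pvScanB rest := rfl

-- B's scan is: strip-and-slice the first line passing pvKeepA, else the fallback
theorem pvScanB_eq_find? (rs : List String) :
    pvScanB rs = match rs.find? pvKeepA with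
      | some l => PySem.Str.slice (PySem.Str.strip l) none (some 200)
      | none => "I dreamed, but the words dissolved." := by
  induction rs with
  | nil => rfl
  | cons line rest ih =>
    rw [pvScanB_cons, List.find?_cons]
    cases h : pvKeepA line
    · simp only [Bool.false_eq_true, if_false, ih]
    · simp

theorem find?_eq_head?_filter' {α : Type} (p : α → Bool) (xs : List α) :
    xs.find? p = (xs.filter p).head? := by
  induction xs with
  | nil => rfl
  | cons x xs ih =>
    rw [List.find?_cons, List.filter_cons]
    cases h : p x
    · rw [if_neg Bool.false_ne_true, ih]
    · simp

theorem getLast?_filter_eq_find?_reverse {α : Type} (p : α → Bool) (xs : List α) :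
    (xs.filter p).getLast? = xs.reverse.find? p := by
  rw [find?_eq_head?_filter', List.filter_reverse, List.head?_reverse]

-- ===== VERDICT (by name: the statement is the Claim_ definition above) =====
theorem extract_dream_excerpt_py_spec : Claim_equal_extract_dream_excerpt_py := by
  intro t _
  show extract_dream_excerpt_py t = extract_dream_excerpt_py_alt t
  unfold extract_dream_excerpt_py extract_dream_excerpt_py_alt
  rw [pvScanB_eq_find?, ← getLast?_filter_eq_find?_reverse]
  simp only [List.getLast?_map]
  cases (((PySem.Str.split? (PySem.Str.strip t) "\n").getD []).filter pvKeepA).getLast? <;> simp
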